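-- pv_equiv track=rewrite | github.com/theVikingMan/LeetCode | LC_Python/LeetCode_286_WallsAndGates.py | solution
-- ===== SOURCE A (Python) =====
-- import collections
--
-- def solution(rooms):
--   q = collections.deque()
--   ROWS, COLS = len(rooms), len(rooms[0])
--   res = [[0 for _ in range(COLS)] for _ in range(ROWS)]
--
--   for r in range(ROWS):
--     for c in range(COLS):
--       if rooms[r][c] == 0:
--         q.append([r,c])
--
--   steps = 0
--   visit = set()
--
--   while q:
--     directions = [[1,0], [-1,0], [0,1], [0,-1]]
--     for _ in range(len(q)):
--       r, c = q.popleft()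
--       rooms[r][c] = steps
--       for x, y in directions:
--         rx, cy = r + x, c + y
--         if (rx, cy) not in visit and 0 <= rx < ROWS and 0 <= cy < COLS and rooms[rx][cy] > 0:
--           q.append([rx, cy])
--           visit.add((rx, cy))
--     steps += 1
--   return rooms
-- ===== SOURCE B (Python) =====
-- def solution(rooms):
--   ROWS, COLS = len(rooms), len(rooms[0])
--   dist = {}
--   for r in range(ROWS):
--     for c in range(COLS):
--       if rooms[r][c] == 0:
--         dist[(r, c)] = 0
--   changed = True
--   while changed:
--     changed = False
--     snapshot = dict(dist)
--     for r in range(ROWS):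
--       for c in range(COLS):
--         if rooms[r][c] > 0 and (r, c) not in snapshot:
--           best = None
--           for q in ((r + 1, c), (r - 1, c), (r, c + 1), (r, c - 1)):
--             if q in snapshot:
--               cand = snapshot[q] + 1
--               if best is None or cand < best:
--                 best = cand
--           if best is not None:
--             dist[(r, c)] = best
--             changed = True
--   for (r, c), v in dist.items():
--     rooms[r][c] = v
--   return rooms
-- ===== Notes on version B (the rewrite author's own statement) =====
-- stated objective: alternative
-- what changed: Replaces the multi-source BFS with a queue and visit set by Jacobi-style iterative relaxation: full-grid sweeps that assign each unlabelled room 1 + the minimum neighbour distance from a snapshot of the previous sweep's distance table, repeated until a sweep changes nothing, then one final write-back.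
import Mathlib
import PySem

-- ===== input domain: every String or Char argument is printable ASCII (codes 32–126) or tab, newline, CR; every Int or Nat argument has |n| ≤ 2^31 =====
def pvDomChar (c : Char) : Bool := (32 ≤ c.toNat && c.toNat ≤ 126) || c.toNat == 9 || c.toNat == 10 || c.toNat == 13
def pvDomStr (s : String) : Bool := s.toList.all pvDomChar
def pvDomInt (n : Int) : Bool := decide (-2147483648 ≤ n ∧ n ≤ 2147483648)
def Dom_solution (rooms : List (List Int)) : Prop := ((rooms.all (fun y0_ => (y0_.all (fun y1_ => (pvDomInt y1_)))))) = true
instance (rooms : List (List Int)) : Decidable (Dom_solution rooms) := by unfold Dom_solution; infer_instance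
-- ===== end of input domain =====

-- B replaces A's deque/visit-set breadth-first search (which mutates the grid while it
-- walks) by Jacobi-style iterative relaxation: repeated full-grid sweeps assign each
-- unlabelled room 1 + the minimum neighbour distance read from a snapshot of the previous
-- sweep's distance table, until a sweep changes nothing; then one final write-back
-- (objective: alternative).  Both Pythons mutate `rooms` in place and return it; the
-- equivalence proved here is about the RETURN value.

-- ===== PORT A =====
-- rooms[r][c] — every read is guarded by 0 <= r < ROWS and 0 <= c < COLS in both programs,
-- where this is exact (the default is never reached on admitted inputs).
def getCell (g : List (List Int)) (r c : Int) : Int :=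
  (PySem.List.pyGet? ((PySem.List.pyGet? g r).getD []) c).getD 0

-- rooms[r][c] = v — only executed with 0 <= r < ROWS, 0 <= c < COLS, where it is exact.
def setCell (g : List (List Int)) (r c : Int) (v : Int) : List (List Int) :=
  g.modify r.toNat (fun row => row.set c.toNat v)

def dirsA : List (Int × Int) := [(1,0), (-1,0), (0,1), (0,-1)]

-- one round of `for _ in range(len(q))`: pops the cells of the current level one by one,
-- writing `steps` into the grid; cells appended to the deque are collected in `acc`.
def bfsLevelA (ROWS COLS steps : Int) :
    List (List Int) → List (Int × Int) → List (Int × Int) → PySem.Set (Int × Int) →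
    List (List Int) × List (Int × Int) × PySem.Set (Int × Int)
  | g, [], acc, visit => (g, acc, visit)
  | g, (r, c) :: rest, acc, visit =>
    let g' := setCell g r c steps
    let st := dirsA.foldl (fun (st : List (Int × Int) × PySem.Set (Int × Int)) dxy =>
      let rx := r + dxy.1
      let cy := c + dxy.2
      if (rx, cy) ∉ st.2 ∧ 0 ≤ rx ∧ rx < ROWS ∧ 0 ≤ cy ∧ cy < COLS ∧ 0 < getCell g' rx cy
      then (st.1 ++ [(rx, cy)], PySem.Set.add st.2 (rx, cy))
      else st) (acc, visit)
    bfsLevelA ROWS COLS steps g' rest st.1 st.2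

-- `while q:` — fuel bounds the number of BFS levels (each level after the first adds at
-- least one cell to `visit`, which holds in-bounds cells only, so ROWS*COLS+1 rounds
-- always suffice); the loop body is unchanged.
def bfsA (ROWS COLS : Int) :
    Nat → List (List Int) → List (Int × Int) → PySem.Set (Int × Int) → Int → List (List Int)
  | 0, g, _, _, _ => g
  | fuel + 1, g, q, visit, steps =>
    if q = [] then g
    else
      let r := bfsLevelA ROWS COLS steps g q [] visit
      bfsA ROWS COLS fuel r.1 r.2.1 r.2.2 (steps + 1)

def solution (rooms : List (List Int)) : List (List Int) :=
  let ROWS : Int := rooms.length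
  let COLS : Int := (((PySem.List.pyGet? rooms 0).getD []).length : Int)
  -- `res` is computed and never used in the Python; omitted.
  let q := (PySem.List.pyRange 0 ROWS 1).flatMap (fun r =>
    (PySem.List.pyRange 0 COLS 1).filterMap (fun c =>
      if getCell rooms r c = 0 then some (r, c) else none))
  bfsA ROWS COLS (ROWS.toNat * COLS.toNat + 1) rooms q PySem.Set.empty 0

-- ===== PORT B =====
-- the nested `for r in range(ROWS): for c in range(COLS):` scan, as one list of cells
def cellsB (ROWS COLS : Int) : List (Int × Int) :=
  (PySem.List.pyRange 0 ROWS 1).flatMap (fun r =>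
    (PySem.List.pyRange 0 COLS 1).map (fun c => (r, c)))

-- the four neighbour tuples ((r+1,c), (r-1,c), (r,c+1), (r,c-1))
def nbrsB (p : Int × Int) : List (Int × Int) :=
  [(p.1 + 1, p.2), (p.1 - 1, p.2), (p.1, p.2 + 1), (p.1, p.2 - 1)]

-- `best = None; for q in nbrs: if q in snapshot: cand = snapshot[q]+1; if best is None or cand < best: best = cand`
def bestB (snap : PySem.Dict (Int × Int) Int) (p : Int × Int) : Option Int :=
  (nbrsB p).foldl (fun best q =>
    match snap.get? q with
    | none => best
    | some v => match best with
      | none => some (v + 1)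
      | some b => if v + 1 < b then some (v + 1) else some b) none

-- body of one sweep iteration over one cell: reads `snap`, writes into the accumulated
-- (dist, changed) pair
def sweepStepB (rooms : List (List Int)) (snap : PySem.Dict (Int × Int) Int)
    (st : PySem.Dict (Int × Int) Int × Bool) (p : Int × Int) :
    PySem.Dict (Int × Int) Int × Bool :=
  if 0 < getCell rooms p.1 p.2 ∧ snap.contains p = false then
    match bestB snap p with
    | none => st
    | some b => (st.1.insert p b, true)
  else st

-- one `while` body: `changed = False; snapshot = dict(dist); for r…for c…: relax`
def sweepB (rooms : List (List Int)) (ROWS COLS : Int)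
    (snap : PySem.Dict (Int × Int) Int) : PySem.Dict (Int × Int) Int × Bool :=
  (cellsB ROWS COLS).foldl (sweepStepB rooms snap) (snap, false)

-- `while changed:` — fuel bounds the number of sweeps (every sweep but the last adds at
-- least one key over at most ROWS*COLS in-bounds cells, so ROWS*COLS+2 sweeps suffice)
def bfLoopB (rooms : List (List Int)) (ROWS COLS : Int) :
    Nat → PySem.Dict (Int × Int) Int → PySem.Dict (Int × Int) Int
  | 0, dist => dist
  | fuel + 1, dist =>
    let s := sweepB rooms ROWS COLS dist
    if s.2 then bfLoopB rooms ROWS COLS fuel s.1 else s.1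

def solution_alt (rooms : List (List Int)) : List (List Int) :=
  let ROWS : Int := rooms.length
  let COLS : Int := (((PySem.List.pyGet? rooms 0).getD []).length : Int)
  let dist0 := (cellsB ROWS COLS).foldl (fun d p =>
    if getCell rooms p.1 p.2 = 0 then d.insert p 0 else d) PySem.Dict.empty
  let dist := bfLoopB rooms ROWS COLS (ROWS.toNat * COLS.toNat + 2) dist0
  dist.items.foldl (fun g kv => setCell g kv.1.1 kv.1.2 kv.2) rooms

-- ===== PRECONDITION & SPEC =====
-- Pre_ excludes exactly the inputs on which A raises IndexError: the empty grid
-- (len(rooms[0]) fails) and grids where some row is shorter than the first row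
-- (the initial gate scan indexes every row up to COLS = len(rooms[0])).
def Pre_solution (rooms : List (List Int)) : Prop :=
  rooms ≠ [] ∧ ∀ row ∈ rooms, ((rooms.head?).getD []).length ≤ row.length
instance (rooms : List (List Int)) : Decidable (Pre_solution rooms) := by
  unfold Pre_solution; infer_instance

def pvWitness_solution : List (List Int) :=
  [[2147483647, -1, 0, 2147483647], [2147483647, 2147483647, 2147483647, -1],
   [2147483647, -1, 2147483647, -1], [0, -1, 2147483647, 2147483647]]

def Spec_solution (rooms : List (List Int)) (out : List (List Int)) : Prop := out = solution_alt rooms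
instance (rooms : List (List Int)) (out : List (List Int)) : Decidable (Spec_solution rooms out) := by unfold Spec_solution; infer_instance

-- ===== CLAIM (what is proved, stated in full; the proofs are below) =====
def Claim_equal_solution : Prop := ∀ (rooms : List (List Int)), Dom_solution rooms → Pre_solution rooms → Spec_solution rooms (solution rooms)

-- ===== LEMMAS AND PROOFS =====

def getO (rooms : List (List Int)) (p : Int × Int) : Int := getCell rooms p.1 p.2

def applyW (g : List (List Int)) (P : List ((Int × Int) × Int)) : List (List Int) :=
  P.foldl (fun g kv => setCell g kv.1.1 kv.1.2 kv.2) g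

def inB (ROWS COLS : Int) (p : Int × Int) : Prop :=
  0 ≤ p.1 ∧ p.1 < ROWS ∧ 0 ≤ p.2 ∧ p.2 < COLS

def GoodKey (rooms : List (List Int)) (p : Int × Int) : Prop :=
  0 ≤ p.1 ∧ p.1.toNat < rooms.length ∧ 0 ≤ p.2 ∧ p.2.toNat < (rooms.getD p.1.toNat []).length

def ShapeLike (rooms g : List (List Int)) : Prop :=
  g.length = rooms.length ∧ ∀ i : Nat, (g.getD i []).length = (rooms.getD i []).length

-- the functional level-by-level BFS used as the PROOF-SIDE intermediate between the two
-- ports: A is related to it by the simulation bfs_sim, B by the bisimulation bf_bisim.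
def candF (rooms : List (List Int)) (ROWS COLS : Int) (dist : PySem.Dict (Int × Int) Int)
    (p : Int × Int) : List (Int × Int) :=
  dirsA.filterMap (fun dxy =>
    let rx := p.1 + dxy.1
    let cy := p.2 + dxy.2
    if 0 ≤ rx ∧ rx < ROWS ∧ 0 ≤ cy ∧ cy < COLS ∧ 0 < getCell rooms rx cy ∧
        PySem.Dict.contains dist (rx, cy) = false
    then some (rx, cy) else none)

def expandF (rooms : List (List Int)) (ROWS COLS : Int) (dist : PySem.Dict (Int × Int) Int)
    (frontier : PySem.Set (Int × Int)) : PySem.Set (Int × Int) :=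
  PySem.Set.ofList (frontier.flatMap (candF rooms ROWS COLS dist))

def bfsF (rooms : List (List Int)) (ROWS COLS : Int) :
    Nat → PySem.Dict (Int × Int) Int → PySem.Set (Int × Int) → Int → PySem.Dict (Int × Int) Int
  | 0, dist, _, _ => dist
  | fuel + 1, dist, frontier, d =>
    if frontier = ([] : List (Int × Int)) then dist
    else
      let dist' := frontier.foldl (fun dd p => dd.insert p d) dist
      bfsF rooms ROWS COLS fuel dist' (expandF rooms ROWS COLS dist' frontier) (d + 1)

def bcond (rooms : List (List Int)) (ROWS COLS : Int) (dist : PySem.Dict (Int × Int) Int)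
    (t : Int × Int) : Bool :=
  decide (0 ≤ t.1 ∧ t.1 < ROWS ∧ 0 ≤ t.2 ∧ t.2 < COLS ∧ 0 < getCell rooms t.1 t.2 ∧
    PySem.Dict.contains dist t = false)

def stepA (ROWS COLS : Int) (g : List (List Int))
    (st : List (Int × Int) × PySem.Set (Int × Int)) (t : Int × Int) :
    List (Int × Int) × PySem.Set (Int × Int) :=
  if t ∉ st.2 ∧ 0 ≤ t.1 ∧ t.1 < ROWS ∧ 0 ≤ t.2 ∧ t.2 < COLS ∧ 0 < getCell g t.1 t.2
  then (st.1 ++ [t], PySem.Set.add st.2 t) else st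

lemma getCell_nonneg_eq (g : List (List Int)) (r c : Int) (hr : 0 ≤ r) (hc : 0 ≤ c) :
    getCell g r c = (g.getD r.toNat []).getD c.toNat 0 := by
  simp [getCell, PySem.List.pyGet?_of_nonneg _ hr, PySem.List.pyGet?_of_nonneg _ hc, List.getD]

lemma shape_setCell (rooms g : List (List Int)) (r c : Int) (v : Int)
    (h : ShapeLike rooms g) : ShapeLike rooms (setCell g r c v) := by
  obtain ⟨h1, h2⟩ := h
  refine ⟨by simpa [setCell] using h1, fun i => ?_⟩
  rw [← h2 i]
  simp only [setCell, List.getD, List.getElem?_modify]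
  by_cases hi : r.toNat = i <;> simp [hi] <;> cases h : g[i]? <;> simp

lemma getCell_setCell_self (rooms g : List (List Int)) (p : Int × Int) (v : Int)
    (hs : ShapeLike rooms g) (hg : GoodKey rooms p) :
    getCell (setCell g p.1 p.2 v) p.1 p.2 = v := by
  obtain ⟨hr, hrl, hc, hcl⟩ := hg
  obtain ⟨h1, h2⟩ := hs
  have hrg : p.1.toNat < g.length := by omega
  have hlen : p.2.toNat < (g.getD p.1.toNat []).length := by rw [h2]; exact hcl
  rw [getCell_nonneg_eq _ _ _ hr hc]
  simp only [setCell, List.getD, List.getElem?_modify, List.getElem?_eq_getElem hrg]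
  simp only [List.getD, List.getElem?_eq_getElem hrg] at hlen
  simp [List.getElem?_set_self (by simpa using hlen)]

lemma getCell_setCell_ne (g : List (List Int)) (r c r' c' : Int) (v : Int)
    (hne : (r', c') ≠ (r, c)) (hr : 0 ≤ r) (hc : 0 ≤ c) (hr' : 0 ≤ r') (hc' : 0 ≤ c') :
    getCell (setCell g r c v) r' c' = getCell g r' c' := by
  rw [getCell_nonneg_eq _ _ _ hr' hc', getCell_nonneg_eq _ _ _ hr' hc']
  simp only [setCell, List.getD, List.getElem?_modify]
  by_cases hi : r.toNat = r'.toNat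
  · have hrr : r = r' := by omega
    have hcc : c ≠ c' := by rintro rfl; exact hne (by rw [hrr])
    have hccn : c.toNat ≠ c'.toNat := by omega
    simp only [hi, if_pos rfl]
    cases h : g[r'.toNat]? <;> simp [List.getElem?_set_ne hccn]
  · simp [hi]

lemma shape_refl (rooms : List (List Int)) : ShapeLike rooms rooms := ⟨rfl, fun _ => rfl⟩

lemma applyW_append (g : List (List Int)) (P Q : List ((Int × Int) × Int)) :
    applyW g (P ++ Q) = applyW (applyW g P) Q := List.foldl_append ..

lemma getCell_applyW_not_mem (rooms : List (List Int)) (P : List ((Int × Int) × Int))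
    (g : List (List Int)) (p : Int × Int)
    (hs : ShapeLike rooms g) (hB : ∀ kv ∈ P, GoodKey rooms kv.1)
    (hp1 : 0 ≤ p.1) (hp2 : 0 ≤ p.2) (hnm : p ∉ P.map Prod.fst) :
    getCell (applyW g P) p.1 p.2 = getCell g p.1 p.2 := by
  induction P generalizing g with
  | nil => rfl
  | cons kv P ih =>
    simp only [List.map_cons, List.mem_cons, not_or] at hnm
    have hk := hB kv (List.mem_cons_self ..)
    have hstep : applyW g (kv :: P) = applyW (setCell g kv.1.1 kv.1.2 kv.2) P := rfl
    rw [hstep]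
    rw [ih _ (shape_setCell _ _ _ _ _ hs) (fun x hx => hB x (List.mem_cons_of_mem _ hx)) hnm.2]
    refine getCell_setCell_ne _ _ _ _ _ _ ?_ hk.1 hk.2.2.1 hp1 hp2
    intro h
    obtain ⟨h1, h2⟩ := Prod.mk.inj h
    exact hnm.1 (Prod.ext h1 h2)

lemma getCell_applyW_mem (rooms : List (List Int)) (P : List ((Int × Int) × Int))
    (g : List (List Int)) (p : Int × Int) (v : Int)
    (hs : ShapeLike rooms g) (hB : ∀ kv ∈ P, GoodKey rooms kv.1)
    (hnd : (P.map Prod.fst).Nodup) (hmem : (p, v) ∈ P) :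
    getCell (applyW g P) p.1 p.2 = v := by
  induction P generalizing g with
  | nil => cases hmem
  | cons kv P ih =>
    simp only [List.map_cons, List.nodup_cons] at hnd
    have hstep : applyW g (kv :: P) = applyW (setCell g kv.1.1 kv.1.2 kv.2) P := rfl
    rw [hstep]
    rcases List.mem_cons.mp hmem with h | h
    · subst h
      have hk := hB (p, v) (List.mem_cons_self ..)
      rw [getCell_applyW_not_mem rooms P _ p (shape_setCell _ _ _ _ _ hs)
        (fun x hx => hB x (List.mem_cons_of_mem _ hx)) hk.1 hk.2.2.1 hnd.1]
      exact getCell_setCell_self rooms g p v hs hk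
    · exact ih _ (shape_setCell _ _ _ _ _ hs) (fun x hx => hB x (List.mem_cons_of_mem _ hx)) hnd.2 h

lemma filterMap_if_eq (l : List (Int × Int)) (f : Int × Int → Int × Int)
    (P : Int × Int → Prop) [DecidablePred P] :
    l.filterMap (fun x => if P (f x) then some (f x) else none)
      = (l.map f).filter (fun t => decide (P t)) := by
  induction l with
  | nil => rfl
  | cons a l ih =>
    simp only [List.filterMap_cons, List.map_cons, List.filter_cons]
    by_cases h : P (f a) <;> simp [h, ih]

lemma candF_eq_filter (rooms : List (List Int)) (ROWS COLS : Int)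
    (dist : PySem.Dict (Int × Int) Int) (p : Int × Int) :
    candF rooms ROWS COLS dist p =
      (dirsA.map (fun dxy => (p.1 + dxy.1, p.2 + dxy.2))).filter (bcond rooms ROWS COLS dist) := by
  unfold candF
  rw [filterMap_if_eq dirsA (fun dxy => (p.1 + dxy.1, p.2 + dxy.2))
    (fun t => 0 ≤ t.1 ∧ t.1 < ROWS ∧ 0 ≤ t.2 ∧ t.2 < COLS ∧ 0 < getCell rooms t.1 t.2 ∧
      PySem.Dict.contains dist t = false)]
  rfl

lemma foldTargets (rooms : List (List Int)) (ROWS COLS : Int)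
    (dist' : PySem.Dict (Int × Int) Int) (g : List (List Int))
    (Hval : ∀ t, inB ROWS COLS t → dist'.contains t = true →
      (0 < getO rooms t ∨ ¬ 0 < getCell g t.1 t.2))
    (Hval2 : ∀ t, inB ROWS COLS t → dist'.contains t = false →
      getCell g t.1 t.2 = getO rooms t) :
    ∀ (ts acc : List (Int × Int)) (visit : PySem.Set (Int × Int)),
    (∀ p, p ∈ visit ↔ ((dist'.contains p = true ∧ 0 < getO rooms p) ∨ p ∈ acc)) →
    (∀ p ∈ acc, inB ROWS COLS p ∧ 0 < getO rooms p ∧ dist'.contains p = false) →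
    acc.Nodup →
    (ts.foldl (stepA ROWS COLS g) (acc, visit)).1 =
        PySem.Set.update acc (ts.filter (bcond rooms ROWS COLS dist'))
    ∧ (∀ p, p ∈ (ts.foldl (stepA ROWS COLS g) (acc, visit)).2 ↔
        ((dist'.contains p = true ∧ 0 < getO rooms p) ∨
          p ∈ (ts.foldl (stepA ROWS COLS g) (acc, visit)).1))
    ∧ (∀ p ∈ (ts.foldl (stepA ROWS COLS g) (acc, visit)).1,
        inB ROWS COLS p ∧ 0 < getO rooms p ∧ dist'.contains p = false)
    ∧ (ts.foldl (stepA ROWS COLS g) (acc, visit)).1.Nodup := by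
  intro ts
  induction ts with
  | nil =>
    intro acc visit hv hacc hnd
    exact ⟨by simp [PySem.Set.update], hv, hacc, hnd⟩
  | cons t ts ih =>
    intro acc visit hv hacc hnd
    have hiff : (t ∉ visit ∧ 0 ≤ t.1 ∧ t.1 < ROWS ∧ 0 ≤ t.2 ∧ t.2 < COLS ∧ 0 < getCell g t.1 t.2)
        ↔ (bcond rooms ROWS COLS dist' t = true ∧ t ∉ acc) := by
      constructor
      · rintro ⟨hnv, hb1, hb2, hb3, hb4, hgv⟩
        have hinB : inB ROWS COLS t := ⟨hb1, hb2, hb3, hb4⟩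
        have hna : t ∉ acc := fun hmem => hnv ((hv t).mpr (Or.inr hmem))
        have hct : dist'.contains t = false := by
          rcases Bool.eq_false_or_eq_true (dist'.contains t) with h | h
          swap
          · exact h
          · rcases Hval t hinB h with h0 | h0
            · exact absurd ((hv t).mpr (Or.inl ⟨h, h0⟩)) hnv
            · exact absurd hgv h0
        have hgo : 0 < getO rooms t := by rw [← Hval2 t hinB hct]; exact hgv
        exact ⟨decide_eq_true ⟨hb1, hb2, hb3, hb4, hgo, hct⟩, hna⟩
      · rintro ⟨hb, hna⟩
        obtain ⟨hb1, hb2, hb3, hb4, hgo, hct⟩ := of_decide_eq_true hb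
        have hinB : inB ROWS COLS t := ⟨hb1, hb2, hb3, hb4⟩
        refine ⟨?_, hb1, hb2, hb3, hb4, by rw [Hval2 t hinB hct]; exact hgo⟩
        intro hvm
        rcases (hv t).mp hvm with ⟨h1, _⟩ | h
        · rw [hct] at h1; cases h1
        · exact hna h
    rw [List.foldl_cons, List.filter_cons]
    by_cases hA : t ∉ visit ∧ 0 ≤ t.1 ∧ t.1 < ROWS ∧ 0 ≤ t.2 ∧ t.2 < COLS ∧ 0 < getCell g t.1 t.2
    · obtain ⟨hb, hna⟩ := hiff.mp hA
      rw [show stepA ROWS COLS g (acc, visit) t = (acc ++ [t], PySem.Set.add visit t) from by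
        simp only [stepA, if_pos hA]]
      rw [hb, if_pos rfl]
      obtain ⟨hb1, hb2, hb3, hb4, hgo, hct⟩ := of_decide_eq_true hb
      have hupd : PySem.Set.update acc (t :: List.filter (bcond rooms ROWS COLS dist') ts)
          = PySem.Set.update (acc ++ [t]) (List.filter (bcond rooms ROWS COLS dist') ts) := by
        rw [PySem.Set.update_cons, PySem.Set.add_of_not_mem hna]
      rw [hupd]
      refine ih (acc ++ [t]) (PySem.Set.add visit t) ?_ ?_ ?_
      · intro p
        rw [PySem.Set.mem_add, hv p, List.mem_append, List.mem_singleton]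
        tauto
      · intro p hp
        rcases List.mem_append.mp hp with h | h
        · exact hacc p h
        · rw [List.mem_singleton] at h; subst h
          exact ⟨⟨hb1, hb2, hb3, hb4⟩, hgo, hct⟩
      · rw [List.nodup_append]
        refine ⟨hnd, List.nodup_singleton _, ?_⟩
        intro a ha b hb heq
        rw [List.mem_singleton] at hb
        subst hb; subst heq
        exact hna ha
    · rw [show stepA ROWS COLS g (acc, visit) t = (acc, visit) from by
        simp only [stepA, if_neg hA]]
      by_cases hb : bcond rooms ROWS COLS dist' t = true
      · have hta : t ∈ acc := by
          by_contra hna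
          exact hA (hiff.mpr ⟨hb, hna⟩)
        rw [hb, if_pos rfl, PySem.Set.update_cons, PySem.Set.add_of_mem hta]
        exact ih acc visit hv hacc hnd
      · rw [Bool.not_eq_true] at hb
        rw [hb, if_neg (by simp)]
        exact ih acc visit hv hacc hnd

lemma levelA_spec (rooms : List (List Int)) (ROWS COLS d : Int)
    (hrect : ∀ p, inB ROWS COLS p → GoodKey rooms p)
    (dist dist' : PySem.Dict (Int × Int) Int) (q : List (Int × Int))
    (hkeys : ∀ p, dist'.contains p = true ↔ (dist.contains p = true ∨ p ∈ q))
    (hd6 : ∀ kv ∈ dist.items, GoodKey rooms kv.1 ∧ 0 ≤ getO rooms kv.1 ∧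
      (getO rooms kv.1 = 0 → kv.2 = 0))
    (hq5 : ∀ p ∈ q, inB ROWS COLS p ∧ (if d = 0 then getO rooms p = 0 else 0 < getO rooms p))
    (hqnd : q.Nodup) (hdknd : (dist.items.map Prod.fst).Nodup)
    (hdisj : ∀ p ∈ q, dist.contains p = false) :
    ∀ (rest done acc : List (Int × Int)) (visit : PySem.Set (Int × Int)),
      q = done ++ rest →
      (∀ p, p ∈ visit ↔ ((dist'.contains p = true ∧ 0 < getO rooms p) ∨ p ∈ acc)) →
      (∀ p ∈ acc, inB ROWS COLS p ∧ 0 < getO rooms p ∧ dist'.contains p = false) →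
      acc.Nodup →
      (bfsLevelA ROWS COLS d (applyW rooms (dist.items ++ done.map (fun p => (p, d)))) rest acc visit).1 =
          applyW rooms (dist.items ++ q.map (fun p => (p, d)))
      ∧ (bfsLevelA ROWS COLS d (applyW rooms (dist.items ++ done.map (fun p => (p, d)))) rest acc visit).2.1 =
          PySem.Set.update acc (rest.flatMap (candF rooms ROWS COLS dist'))
      ∧ (∀ p, p ∈ (bfsLevelA ROWS COLS d (applyW rooms (dist.items ++ done.map (fun p => (p, d)))) rest acc visit).2.2 ↔
          ((dist'.contains p = true ∧ 0 < getO rooms p) ∨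
            p ∈ (bfsLevelA ROWS COLS d (applyW rooms (dist.items ++ done.map (fun p => (p, d)))) rest acc visit).2.1))
      ∧ (∀ p ∈ (bfsLevelA ROWS COLS d (applyW rooms (dist.items ++ done.map (fun p => (p, d)))) rest acc visit).2.1,
          inB ROWS COLS p ∧ 0 < getO rooms p ∧ dist'.contains p = false)
      ∧ (bfsLevelA ROWS COLS d (applyW rooms (dist.items ++ done.map (fun p => (p, d)))) rest acc visit).2.1.Nodup := by
  -- facts about the write list for a processed prefix u of q
  have hndk : ∀ p ∈ q, p ∉ dist.items.map Prod.fst := by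
    intro p hp hmem
    have : dist.contains p = true := by
      rw [PySem.Dict.contains_iff_mem_keys]
      simpa [PySem.Dict.keys] using hmem
    rw [hdisj p hp] at this; cases this
  have hGood : ∀ (u : List (Int × Int)), (∀ p ∈ u, p ∈ q) →
      ∀ kv ∈ dist.items ++ u.map (fun p => (p, d)), GoodKey rooms kv.1 := by
    intro u hu kv hkv
    rcases List.mem_append.mp hkv with h | h
    · exact (hd6 kv h).1
    · obtain ⟨p, hp, rfl⟩ := List.mem_map.mp h
      exact hrect p (hq5 p (hu p hp)).1
  have hNodup : ∀ (u : List (Int × Int)), u.Nodup → (∀ p ∈ u, p ∈ q) →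
      ((dist.items ++ u.map (fun p => (p, d))).map Prod.fst).Nodup := by
    intro u hnd hu
    have hmap : List.map (Prod.fst ∘ fun p => (p, d)) u = u := by
      simp [Function.comp_def]
    rw [List.map_append, List.map_map, hmap, List.nodup_append]
    refine ⟨hdknd, hnd, ?_⟩
    intro a ha b hb heq
    subst heq
    exact hndk a (hu a hb) ha
  intro rest
  induction rest with
  | nil =>
    intro done acc visit hsplit hv hacc hnd
    rw [List.append_nil] at hsplit
    subst hsplit
    exact ⟨rfl, by simp [bfsLevelA, PySem.Set.update], by simpa [bfsLevelA] using hv,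
      by simpa [bfsLevelA] using hacc, by simpa [bfsLevelA] using hnd⟩
  | cons cur rest ih =>
    intro done acc visit hsplit hv hacc hnd
    obtain ⟨r, c⟩ := cur
    have hcurq : (r, c) ∈ q := by rw [hsplit]; simp
    have hsplit' : q = (done ++ [(r, c)]) ++ rest := by rw [hsplit]; simp
    have hdone1q : ∀ p ∈ done ++ [(r, c)], p ∈ q := by
      intro p hp; rw [hsplit']; exact List.mem_append_left _ hp
    have hdone1nd : (done ++ [(r, c)]).Nodup := by
      rw [hsplit'] at hqnd; exact hqnd.sublist (List.sublist_append_left _ _)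
    -- the grid after writing the current cell
    have hg' : setCell (applyW rooms (dist.items ++ done.map (fun p => (p, d)))) r c d =
        applyW rooms (dist.items ++ (done ++ [(r, c)]).map (fun p => (p, d))) := by
      conv_rhs => rw [List.map_append, ← List.append_assoc, applyW_append]
      rfl
    have hkeymem : ∀ t : Int × Int, t ∈ dist.items.map Prod.fst ↔ dist.contains t = true := by
      intro t
      rw [PySem.Dict.contains_iff_mem_keys]
      simp [PySem.Dict.keys]
    have hrestdisj : ∀ t ∈ rest, t ∉ done ++ [(r, c)] := by
      have hnd2 := hqnd
      rw [hsplit', List.nodup_append] at hnd2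
      intro t htr htd
      exact hnd2.2.2 t htd t htr rfl
    have Hval2 : ∀ t, inB ROWS COLS t → dist'.contains t = false →
        getCell (applyW rooms (dist.items ++ (done ++ [(r, c)]).map (fun p => (p, d)))) t.1 t.2
          = getO rooms t := by
      intro t ht hc
      have hnq : ¬ (dist.contains t = true ∨ t ∈ q) := by
        intro h; rw [(hkeys t).mpr h] at hc; cases hc
      push_neg at hnq
      apply getCell_applyW_not_mem rooms _ _ _ (shape_refl rooms) (hGood _ hdone1q) ht.1 ht.2.2.1
      rw [List.map_append, List.map_map]
      intro hmem
      rcases List.mem_append.mp hmem with h | h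
      · exact hnq.1 ((hkeymem t).mp h)
      · refine hnq.2 ?_
        have : t ∈ done ++ [(r, c)] := by simpa using h
        exact hdone1q t this
    have Hval : ∀ t, inB ROWS COLS t → dist'.contains t = true →
        (0 < getO rooms t ∨
          ¬ 0 < getCell (applyW rooms (dist.items ++ (done ++ [(r, c)]).map (fun p => (p, d)))) t.1 t.2) := by
      intro t ht hc
      by_cases hgo : 0 < getO rooms t
      · exact Or.inl hgo
      right
      rcases (hkeys t).mp hc with h | h
      · have hmemk : t ∈ dist.items.map Prod.fst := (hkeymem t).mpr h
        obtain ⟨kv, hkv, hfst⟩ := List.mem_map.mp hmemk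
        obtain ⟨hgk, hge, hz⟩ := hd6 kv hkv
        have hg0 : getO rooms kv.1 = 0 := by
          rw [hfst]; rw [hfst] at hge; omega
        have hv0 : kv.2 = 0 := hz hg0
        have hwr : getCell (applyW rooms (dist.items ++ (done ++ [(r, c)]).map (fun p => (p, d)))) t.1 t.2 = kv.2 := by
          refine getCell_applyW_mem rooms _ _ t kv.2 (shape_refl _) (hGood _ hdone1q)
            (hNodup _ hdone1nd hdone1q) ?_
          refine List.mem_append_left _ ?_
          rw [show (t, kv.2) = kv from by rw [← hfst]]
          exact hkv
        rw [hwr, hv0]; omega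
      · have h5 := hq5 t h
        by_cases hd0 : d = 0
        · have hgo0 : getO rooms t = 0 := by
            have := h5.2; rwa [if_pos hd0] at this
          rw [hsplit'] at h
          rcases List.mem_append.mp h with h | h
          · have hwr : getCell (applyW rooms (dist.items ++ (done ++ [(r, c)]).map (fun p => (p, d)))) t.1 t.2 = d := by
              refine getCell_applyW_mem rooms _ _ t d (shape_refl _) (hGood _ hdone1q)
                (hNodup _ hdone1nd hdone1q) ?_
              exact List.mem_append_right _ (List.mem_map.mpr ⟨t, h, rfl⟩)
            rw [hwr, hd0]; omega
          · have hnm : t ∉ (dist.items ++ (done ++ [(r, c)]).map (fun p => (p, d))).map Prod.fst := by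
              rw [List.map_append, List.map_map]
              intro hmem
              rcases List.mem_append.mp hmem with hm | hm
              · have hct := (hkeymem t).mp hm
                have htq : t ∈ q := by rw [hsplit']; exact List.mem_append_right _ h
                rw [hdisj t htq] at hct
                cases hct
              · exact hrestdisj t h (by simpa using hm)
            rw [getCell_applyW_not_mem rooms _ _ t (shape_refl _) (hGood _ hdone1q) ht.1 ht.2.2.1 hnm]
            have : getCell rooms t.1 t.2 = getO rooms t := rfl
            rw [this, hgo0]; omega
        · exfalso
          have := h5.2; rw [if_neg hd0] at this; exact hgo this
    have ffold : ∀ (G : List (List Int)) (init : List (Int × Int) × PySem.Set (Int × Int)),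
        dirsA.foldl (fun (st : List (Int × Int) × PySem.Set (Int × Int)) dxy =>
          let rx := r + dxy.1
          let cy := c + dxy.2
          if (rx, cy) ∉ st.2 ∧ 0 ≤ rx ∧ rx < ROWS ∧ 0 ≤ cy ∧ cy < COLS ∧ 0 < getCell G rx cy
          then (st.1 ++ [(rx, cy)], PySem.Set.add st.2 (rx, cy))
          else st) init
        = (dirsA.map (fun dxy => (r + dxy.1, c + dxy.2))).foldl (stepA ROWS COLS G) init :=
      by intro G init; rw [List.foldl_map]; rfl
    have hstep : bfsLevelA ROWS COLS d (applyW rooms (dist.items ++ done.map (fun p => (p, d)))) ((r, c) :: rest) acc visit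
        = bfsLevelA ROWS COLS d (applyW rooms (dist.items ++ (done ++ [(r, c)]).map (fun p => (p, d)))) rest
            ((dirsA.map (fun dxy => (r + dxy.1, c + dxy.2))).foldl
              (stepA ROWS COLS (applyW rooms (dist.items ++ (done ++ [(r, c)]).map (fun p => (p, d))))) (acc, visit)).1
            ((dirsA.map (fun dxy => (r + dxy.1, c + dxy.2))).foldl
              (stepA ROWS COLS (applyW rooms (dist.items ++ (done ++ [(r, c)]).map (fun p => (p, d))))) (acc, visit)).2 := by
      conv_lhs => rw [bfsLevelA]
      rw [hg', ffold]
    obtain ⟨ft1, ft2, ft3, ft4⟩ := foldTargets rooms ROWS COLS dist'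
      (applyW rooms (dist.items ++ (done ++ [(r, c)]).map (fun p => (p, d)))) Hval Hval2
      (dirsA.map (fun dxy => (r + dxy.1, c + dxy.2))) acc visit hv hacc hnd
    have hcand : (dirsA.map (fun dxy => (r + dxy.1, c + dxy.2))).filter (bcond rooms ROWS COLS dist')
        = candF rooms ROWS COLS dist' (r, c) := (candF_eq_filter rooms ROWS COLS dist' (r, c)).symm
    obtain ⟨ih1, ih2, ih3, ih4, ih5⟩ := ih (done ++ [(r, c)])
      ((dirsA.map (fun dxy => (r + dxy.1, c + dxy.2))).foldl
        (stepA ROWS COLS (applyW rooms (dist.items ++ (done ++ [(r, c)]).map (fun p => (p, d))))) (acc, visit)).1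
      ((dirsA.map (fun dxy => (r + dxy.1, c + dxy.2))).foldl
        (stepA ROWS COLS (applyW rooms (dist.items ++ (done ++ [(r, c)]).map (fun p => (p, d))))) (acc, visit)).2
      hsplit' ft2 ft3 ft4
    rw [hstep]
    refine ⟨ih1, ?_, ih3, ih4, ih5⟩
    rw [ih2, ft1, hcand, List.flatMap_cons, ← PySem.Set.update_append]

lemma bfs_sim (rooms : List (List Int)) (ROWS COLS : Int)
    (hrect : ∀ p, inB ROWS COLS p → GoodKey rooms p) :
    ∀ (fuel : Nat) (dist : PySem.Dict (Int × Int) Int) (q : List (Int × Int))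
      (visit : PySem.Set (Int × Int)) (d : Int), 0 ≤ d →
    (∀ p, p ∈ visit ↔ ((dist.contains p = true ∨ p ∈ q) ∧ 0 < getO rooms p)) →
    (∀ p ∈ q, inB ROWS COLS p ∧ (if d = 0 then getO rooms p = 0 else 0 < getO rooms p)) →
    q.Nodup →
    (∀ p ∈ q, dist.contains p = false) →
    (∀ kv ∈ dist.items, GoodKey rooms kv.1 ∧ 0 ≤ getO rooms kv.1 ∧
      (getO rooms kv.1 = 0 → kv.2 = 0)) →
    (dist.items.map Prod.fst).Nodup →
    bfsA ROWS COLS fuel (applyW rooms dist.items) q visit d =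
      applyW rooms (bfsF rooms ROWS COLS fuel dist q d).items := by
  intro fuel
  induction fuel with
  | zero => intro dist q visit d _ _ _ _ _ _ _; rfl
  | succ fuel ih =>
    intro dist q visit d hd hv hq5 hqnd hdisj hd6 hdknd
    by_cases hq : q = []
    · subst hq
      simp [bfsA, bfsF]
    · rw [bfsA, bfsF, if_neg hq, if_neg hq]
      have hitems' : (q.foldl (fun dd p => dd.insert p d) dist).items
          = dist.items ++ q.map (fun p => (p, d)) := by
        exact PySem.Dict.items_foldl_insert_fresh (k := fun a => a) (v := fun _ => d)
          (l := q) (d := dist) hdisj (by simpa using hqnd)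
      have hkeys' : ∀ p : Int × Int,
          (q.foldl (fun dd p => dd.insert p d) dist).contains p = true
            ↔ (dist.contains p = true ∨ p ∈ q) := by
        intro p
        rw [PySem.Dict.contains_iff_mem_keys, PySem.Dict.keys_foldl_insert,
          PySem.Set.mem_update, ← PySem.Dict.contains_iff_mem_keys]
      have lv := levelA_spec rooms ROWS COLS d hrect dist
        (q.foldl (fun dd p => dd.insert p d) dist) q hkeys' hd6 hq5 hqnd hdknd hdisj
        q [] [] visit rfl
        (by intro p
            rw [hv p, hkeys' p]
            simp)
        (by intro p hp; cases hp)
        List.nodup_nil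
      simp only [List.map_nil, List.append_nil] at lv
      obtain ⟨lv1, lv2, lv3, lv4, lv5⟩ := lv
      show bfsA ROWS COLS fuel
          (bfsLevelA ROWS COLS d (applyW rooms dist.items) q [] visit).1
          (bfsLevelA ROWS COLS d (applyW rooms dist.items) q [] visit).2.1
          (bfsLevelA ROWS COLS d (applyW rooms dist.items) q [] visit).2.2 (d + 1)
        = applyW rooms (bfsF rooms ROWS COLS fuel (List.foldl (fun dd p => dd.insert p d) dist q)
            (expandF rooms ROWS COLS (List.foldl (fun dd p => dd.insert p d) dist q) q) (d + 1)).items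
      rw [lv1]
      have hexp : PySem.Set.update ([] : List (Int × Int))
            (q.flatMap (candF rooms ROWS COLS (q.foldl (fun dd p => dd.insert p d) dist)))
          = expandF rooms ROWS COLS (q.foldl (fun dd p => dd.insert p d) dist) q := by
        rw [expandF, PySem.Set.update_nil_left]
      have hL : (bfsLevelA ROWS COLS d (applyW rooms dist.items) q [] visit).2.1
          = expandF rooms ROWS COLS (List.foldl (fun dd p => dd.insert p d) dist q) q :=
        lv2.trans hexp
      rw [hL, ← hitems']
      rw [hL] at lv3 lv4 lv5
      refine ih _ _ _ (d + 1) (by omega) ?_ ?_ lv5 ?_ ?_ ?_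
      · intro p
        rw [lv3 p]
        constructor
        · rintro (⟨h1, h2⟩ | h)
          · exact ⟨Or.inl h1, h2⟩
          · exact ⟨Or.inr h, (lv4 p h).2.1⟩
        · rintro ⟨h1 | h1, h2⟩
          · exact Or.inl ⟨h1, h2⟩
          · exact Or.inr h1
      · intro p hp
        have h4 := lv4 p hp
        rw [if_neg (by omega : ¬ d + 1 = 0)]
        exact ⟨h4.1, h4.2.1⟩
      · intro p hp
        exact (lv4 p hp).2.2
      · rw [hitems']
        intro kv hkv
        rcases List.mem_append.mp hkv with h | h
        · exact hd6 kv h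
        · obtain ⟨p, hp, rfl⟩ := List.mem_map.mp h
          have h5 := hq5 p hp
          refine ⟨hrect p h5.1, ?_, ?_⟩
          · show 0 ≤ getO rooms p
            by_cases hd0 : d = 0
            · rw [if_pos hd0] at h5; omega
            · rw [if_neg hd0] at h5; omega
          · intro hg0
            have hg0' : getO rooms p = 0 := hg0
            show d = 0
            by_cases hd0 : d = 0
            · exact hd0
            · rw [if_neg hd0] at h5; omega
      · rw [hitems', List.map_append, List.map_map]
        have hmap : List.map (Prod.fst ∘ fun p => (p, d)) q = q := by
          simp [Function.comp_def]
        rw [hmap, List.nodup_append]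
        refine ⟨hdknd, hqnd, ?_⟩
        intro a ha b hb heq
        subst heq
        have : dist.contains a = true := by
          rw [PySem.Dict.contains_iff_mem_keys]
          simpa [PySem.Dict.keys] using ha
        rw [hdisj a hb] at this
        cases this


-- ===== B-side characterization =====

lemma contains_true_iff (D : PySem.Dict (Int × Int) Int) (x : Int × Int) :
    D.contains x = true ↔ ∃ v, D.get? x = some v := by
  rw [PySem.Dict.contains_eq_isSome_get?]
  cases h : D.get? x <;> simp

lemma contains_false_iff (D : PySem.Dict (Int × Int) Int) (x : Int × Int) :
    D.contains x = false ↔ D.get? x = none := by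
  rw [PySem.Dict.contains_eq_isSome_get?]
  cases h : D.get? x <;> simp

lemma mem_cellsB (R C : Int) (p : Int × Int) : p ∈ cellsB R C ↔ inB R C p := by
  unfold cellsB inB
  rw [List.mem_flatMap]
  constructor
  · rintro ⟨r, hr, hm⟩
    rw [List.mem_map] at hm
    obtain ⟨c, hc, rfl⟩ := hm
    rw [PySem.List.mem_pyRange_one] at hr hc
    exact ⟨hr.1, hr.2, hc.1, hc.2⟩
  · rintro ⟨h1, h2, h3, h4⟩
    refine ⟨p.1, PySem.List.mem_pyRange_one.mpr ⟨h1, h2⟩, List.mem_map.mpr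
      ⟨p.2, PySem.List.mem_pyRange_one.mpr ⟨h3, h4⟩, rfl⟩⟩

lemma nodup_cellsB (R C : Int) : (cellsB R C).Nodup := by
  unfold cellsB
  rw [List.nodup_flatMap]
  constructor
  · intro r _
    exact (PySem.List.nodup_pyRange_one 0 C).map (fun a b h => (Prod.mk.inj h).2)
  · refine (PySem.List.nodup_pyRange_one 0 R).imp ?_
    intro r r' hne x hx hx'
    rw [List.mem_map] at hx hx'
    obtain ⟨c, _, rfl⟩ := hx
    obtain ⟨c', _, h⟩ := hx'
    exact hne ((Prod.mk.inj h).1.symm)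

lemma length_cellsB (R C : Int) (hR : 0 ≤ R) (hC : 0 ≤ C) :
    (cellsB R C).length = R.toNat * C.toNat := by
  unfold cellsB
  rw [List.length_flatMap]
  simp only [List.length_map, PySem.List.length_pyRange_one]
  rw [List.map_const', List.sum_replicate, smul_eq_mul, PySem.List.length_pyRange_one]
  norm_num

lemma nodup_subset_length {α : Type} [DecidableEq α] {l l' : List α}
    (h : l.Nodup) (hs : ∀ a ∈ l, a ∈ l') : l.length ≤ l'.length := by
  have h1 : l.toFinset.card = l.length := List.toFinset_card_of_nodup h
  have h2 : l.toFinset ⊆ l'.toFinset := by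
    intro a ha
    exact List.mem_toFinset.mpr (hs a (List.mem_toFinset.mp ha))
  have h3 := Finset.card_le_card h2
  have h4 : l'.toFinset.card ≤ l'.length := List.toFinset_card_le l'
  omega

lemma items_le (R C : Int) (Dd : PySem.Dict (Int × Int) Int)
    (hn : Dd.keys.Nodup) (hb : ∀ kv ∈ Dd.items, inB R C kv.1) :
    Dd.items.length ≤ (cellsB R C).length := by
  have hk : Dd.keys = Dd.items.map Prod.fst := rfl
  have hlen : Dd.items.length = Dd.keys.length := by rw [hk, List.length_map]
  rw [hlen]
  apply nodup_subset_length hn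
  intro a ha
  rw [hk] at ha
  obtain ⟨kv, hkv, rfl⟩ := List.mem_map.mp ha
  exact (mem_cellsB R C kv.1).mpr (hb kv hkv)

lemma get?_foldl_insert_const (v : Int) :
    ∀ (l : List (Int × Int)) (dd : PySem.Dict (Int × Int) Int) (x : Int × Int),
    (l.foldl (fun d p => d.insert p v) dd).get? x = if x ∈ l then some v else dd.get? x := by
  intro l
  induction l with
  | nil => intro dd x; simp
  | cons p l ih =>
    intro dd x
    rw [List.foldl_cons, ih]
    by_cases hl : x ∈ l
    · rw [if_pos hl, if_pos (List.mem_cons_of_mem _ hl)]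
    · rw [if_neg hl, PySem.Dict.get?_insert]
      by_cases hp : x = p
      · rw [if_pos hp, if_pos (by simp [hp])]
      · rw [if_neg hp, if_neg (by simp [hp, hl])]

lemma get?_initFold (rooms : List (List Int)) :
    ∀ (l : List (Int × Int)) (dd : PySem.Dict (Int × Int) Int) (x : Int × Int),
    (l.foldl (fun d p => if getCell rooms p.1 p.2 = 0 then d.insert p 0 else d) dd).get? x
      = if x ∈ l ∧ getCell rooms x.1 x.2 = 0 then some 0 else dd.get? x := by
  intro l
  induction l with
  | nil => intro dd x; simp
  | cons p l ih =>
    intro dd x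
    rw [List.foldl_cons]
    by_cases hc : getCell rooms p.1 p.2 = 0
    · rw [if_pos hc, ih]
      by_cases hx : x ∈ l ∧ getCell rooms x.1 x.2 = 0
      · rw [if_pos hx, if_pos ⟨List.mem_cons_of_mem _ hx.1, hx.2⟩]
      · rw [if_neg hx, PySem.Dict.get?_insert]
        by_cases hp : x = p
        · rw [if_pos hp, if_pos ⟨by simp [hp], by rw [hp]; exact hc⟩]
        · rw [if_neg hp, if_neg (by
            rintro ⟨hm, hg⟩
            rcases List.mem_cons.mp hm with h | h
            · exact hp h
            · exact hx ⟨h, hg⟩)]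
    · rw [if_neg hc, ih]
      by_cases hx : x ∈ l ∧ getCell rooms x.1 x.2 = 0
      · rw [if_pos hx, if_pos ⟨List.mem_cons_of_mem _ hx.1, hx.2⟩]
      · rw [if_neg hx, if_neg (by
          rintro ⟨hm, hg⟩
          rcases List.mem_cons.mp hm with h | h
          · exact hc (by rw [← h]; exact hg)
          · exact hx ⟨h, hg⟩)]

lemma nodup_keys_initFold (rooms : List (List Int)) :
    ∀ (l : List (Int × Int)) (dd : PySem.Dict (Int × Int) Int), dd.keys.Nodup →
    (l.foldl (fun d p => if getCell rooms p.1 p.2 = 0 then d.insert p 0 else d) dd).keys.Nodup := by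
  intro l
  induction l with
  | nil => intro dd h; exact h
  | cons p l ih =>
    intro dd h
    rw [List.foldl_cons]
    by_cases hc : getCell rooms p.1 p.2 = 0
    · rw [if_pos hc]; exact ih _ (PySem.Dict.nodup_keys_insert _ _ _ h)
    · rw [if_neg hc]; exact ih _ h

lemma mem_dirs_map (f p : Int × Int) :
    p ∈ dirsA.map (fun dxy => (f.1 + dxy.1, f.2 + dxy.2)) ↔ f ∈ nbrsB p := by
  simp [dirsA, nbrsB, Prod.ext_iff]
  omega

lemma mem_candF (rooms : List (List Int)) (R C : Int) (dd : PySem.Dict (Int × Int) Int)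
    (f p : Int × Int) :
    p ∈ candF rooms R C dd f ↔
      (f ∈ nbrsB p ∧ inB R C p ∧ 0 < getCell rooms p.1 p.2 ∧ dd.contains p = false) := by
  rw [candF_eq_filter, List.mem_filter]
  constructor
  · rintro ⟨hm, hb⟩
    obtain ⟨h1, h2, h3, h4, h5, h6⟩ := of_decide_eq_true hb
    exact ⟨(mem_dirs_map f p).mp hm, ⟨h1, h2, h3, h4⟩, h5, h6⟩
  · rintro ⟨hf, ⟨h1, h2, h3, h4⟩, h5, h6⟩
    exact ⟨(mem_dirs_map f p).mpr hf, decide_eq_true ⟨h1, h2, h3, h4, h5, h6⟩⟩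

def bStep (snap : PySem.Dict (Int × Int) Int) (best : Option Int) (q : Int × Int) : Option Int :=
  match snap.get? q with
  | none => best
  | some v => match best with
    | none => some (v + 1)
    | some b => if v + 1 < b then some (v + 1) else some b

lemma foldl_bStep_char (snap : PySem.Dict (Int × Int) Int) (dv : Int) :
    ∀ (l : List (Int × Int)), (∀ q ∈ l, ∀ v, snap.get? q = some v → v = dv) →
    ∀ (acc : Option Int), (acc = none ∨ acc = some (dv + 1)) →
    l.foldl (bStep snap) acc
    = if ∃ q ∈ l, snap.contains q = true then some (dv + 1) else acc := by
  intro l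
  induction l with
  | nil => intro _ acc _; simp
  | cons q l ih =>
    intro h acc hacc
    rw [List.foldl_cons]
    cases hq : snap.get? q with
    | none =>
      have hc : snap.contains q = false := (contains_false_iff snap q).mpr hq
      have hiff : (∃ x ∈ q :: l, snap.contains x = true) ↔ (∃ x ∈ l, snap.contains x = true) := by
        simp [hc]
      have hs : bStep snap acc q = acc := by simp [bStep, hq]
      rw [hs, ih (fun x hx => h x (List.mem_cons_of_mem _ hx)) acc hacc]
      by_cases he : ∃ x ∈ l, snap.contains x = true
      · rw [if_pos he, if_pos (hiff.mpr he)]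
      · rw [if_neg he, if_neg (fun hc2 => he (hiff.mp hc2))]
    | some v =>
      have hv : v = dv := h q (List.mem_cons_self ..) v hq
      subst hv
      have hc : snap.contains q = true := (contains_true_iff snap q).mpr ⟨v, hq⟩
      have hs : bStep snap acc q = some (v + 1) := by
        rcases hacc with rfl | rfl
        · simp [bStep, hq]
        · simp [bStep, hq]
      have hex : ∃ x ∈ q :: l, snap.contains x = true := ⟨q, List.mem_cons_self .., hc⟩
      rw [hs, ih (fun x hx => h x (List.mem_cons_of_mem _ hx)) (some (v + 1)) (Or.inr rfl),
        if_pos hex]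
      by_cases he : ∃ x ∈ l, snap.contains x = true
      · rw [if_pos he]
      · rw [if_neg he]

def swCond (rooms : List (List Int)) (snap : PySem.Dict (Int × Int) Int) (p : Int × Int) : Bool :=
  decide (0 < getCell rooms p.1 p.2) && !snap.contains p &&
    decide (∃ q ∈ nbrsB p, snap.contains q = true)

lemma sweep_fold_char (rooms : List (List Int)) (R C : Int)
    (snap : PySem.Dict (Int × Int) Int) (dv : Int)
    (H : ∀ p : Int × Int, inB R C p → 0 < getCell rooms p.1 p.2 → snap.contains p = false →
       ∀ q ∈ nbrsB p, ∀ v, snap.get? q = some v → v = dv) :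
    ∀ (l : List (Int × Int)), (∀ p ∈ l, inB R C p) → ∀ (acc : PySem.Dict (Int × Int) Int × Bool),
    l.foldl (sweepStepB rooms snap) acc
      = ((l.filter (swCond rooms snap)).foldl (fun dd p => dd.insert p (dv + 1)) acc.1,
         (acc.2 || !(l.filter (swCond rooms snap)).isEmpty)) := by
  intro l
  induction l with
  | nil => intro _ acc; simp
  | cons p l ih =>
    intro hl acc
    have hpb : inB R C p := hl p (List.mem_cons_self ..)
    rw [List.foldl_cons, List.filter_cons]
    cases hcnd : swCond rooms snap p with
    | true =>
      have hcnd' := hcnd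
      simp only [swCond, Bool.and_eq_true, Bool.not_eq_true', decide_eq_true_eq] at hcnd'
      obtain ⟨⟨hpos, hnc⟩, hex⟩ := hcnd'
      have hbest : bestB snap p = some (dv + 1) := by
        have hb : bestB snap p = (nbrsB p).foldl (bStep snap) none := rfl
        rw [hb, foldl_bStep_char snap dv (nbrsB p) (H p hpb hpos hnc) none (Or.inl rfl),
          if_pos hex]
      have hstep : sweepStepB rooms snap acc p = (acc.1.insert p (dv + 1), true) := by
        rw [sweepStepB, if_pos ⟨hpos, hnc⟩, hbest]
      rw [hstep, ih (fun x hx => hl x (List.mem_cons_of_mem _ hx))]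
      simp
    | false =>
      have hstep : sweepStepB rooms snap acc p = acc := by
        rw [sweepStepB]
        by_cases hif : 0 < getCell rooms p.1 p.2 ∧ snap.contains p = false
        · have hnex : ¬ ∃ q ∈ nbrsB p, snap.contains q = true := by
            intro hex
            rw [show swCond rooms snap p = true from by
              simp only [swCond, Bool.and_eq_true, Bool.not_eq_true', decide_eq_true_eq]
              exact ⟨⟨hif.1, hif.2⟩, hex⟩] at hcnd
            cases hcnd
          have hbest : bestB snap p = none := by
            have hb : bestB snap p = (nbrsB p).foldl (bStep snap) none := rfl
            rw [hb, foldl_bStep_char snap dv (nbrsB p) (H p hpb hif.1 hif.2) none (Or.inl rfl),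
              if_neg hnex]
          rw [if_pos hif, hbest]
        · rw [if_neg hif]
      rw [hstep, ih (fun x hx => hl x (List.mem_cons_of_mem _ hx))]
      simp

-- ===== the bisimulation between the functional BFS and B's sweep relaxation =====

lemma bf_bisim (rooms : List (List Int)) (R C : Int) :
    ∀ (fuelA : Nat) (fuelB : Nat) (dist : PySem.Dict (Int × Int) Int)
      (frontier : List (Int × Int)) (d : Int) (D : PySem.Dict (Int × Int) Int),
    (∀ p, D.get? p = if p ∈ frontier then some d else dist.get? p) →
    frontier.Nodup →
    (∀ p ∈ frontier, inB R C p ∧ dist.contains p = false) →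
    (∀ kv ∈ dist.items, inB R C kv.1) →
    dist.keys.Nodup → D.keys.Nodup →
    (∀ p, inB R C p → 0 < getCell rooms p.1 p.2 → D.contains p = false →
       ∀ q ∈ nbrsB p, ∀ v, D.get? q = some v → v = d ∧ q ∈ frontier) →
    (cellsB R C).length + 1 ≤ fuelA + dist.items.length →
    (cellsB R C).length + 2 ≤ fuelB + D.items.length →
    (∀ p, (bfsF rooms R C fuelA dist frontier d).get? p = (bfLoopB rooms R C fuelB D).get? p)
    ∧ (bfsF rooms R C fuelA dist frontier d).keys.Nodup
    ∧ (∀ kv ∈ (bfsF rooms R C fuelA dist frontier d).items, inB R C kv.1)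
    ∧ (bfLoopB rooms R C fuelB D).keys.Nodup
    ∧ (∀ kv ∈ (bfLoopB rooms R C fuelB D).items, inB R C kv.1) := by
  intro fuelA
  induction fuelA with
  | zero =>
    intro fuelB dist frontier d D hrel hfnd hfr hdb hdn hDn hii hA hB
    exfalso
    have h1 := items_le R C dist hdn hdb
    omega
  | succ fuelA ih =>
    intro fuelB dist frontier d D hrel hfnd hfr hdb hdn hDn hii hA hB
    have hDb : ∀ kv ∈ D.items, inB R C kv.1 := by
      intro kv hkv
      obtain ⟨k, v⟩ := kv
      have hg : D.get? k = some v := PySem.Dict.get?_of_mem_items D hkv hDn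
      rw [hrel] at hg
      by_cases hm : k ∈ frontier
      · exact (hfr _ hm).1
      · rw [if_neg hm] at hg
        exact hdb _ (PySem.Dict.mem_items_of_get?_eq_some dist hg)
    have hDle := items_le R C D hDn hDb
    obtain ⟨fB, rfl⟩ : ∃ fB, fuelB = fB + 1 := ⟨fuelB - 1, by omega⟩
    by_cases hfe : frontier = []
    · subst hfe
      have hreln : ∀ p, D.get? p = dist.get? p := by intro p; simpa using hrel p
      have hfilter : (cellsB R C).filter (swCond rooms D) = [] := by
        rw [List.filter_eq_nil_iff]
        intro p hp hcond
        simp only [swCond, Bool.and_eq_true, Bool.not_eq_true', decide_eq_true_eq] at hcond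
        obtain ⟨⟨hpos, hnc⟩, q, hq, hqc⟩ := hcond
        obtain ⟨v, hv⟩ := (contains_true_iff D q).mp hqc
        exact List.not_mem_nil (hii p ((mem_cellsB R C p).mp hp) hpos hnc q hq v hv).2
      have hsw : sweepB rooms R C D = (D, false) := by
        rw [sweepB, sweep_fold_char rooms R C D d
          (fun p hb hpos hnc q hq v hv => (hii p hb hpos hnc q hq v hv).1)
          (cellsB R C) (fun p hp => (mem_cellsB R C p).mp hp) (D, false), hfilter]
        simp
      have hRB : bfLoopB rooms R C (fB + 1) D = D := by
        rw [bfLoopB, hsw]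
        simp
      have hRA : bfsF rooms R C (fuelA + 1) dist [] d = dist := by
        rw [bfsF, if_pos rfl]
      rw [hRA, hRB]
      exact ⟨fun p => (hreln p).symm, hdn, hdb, hDn, hDb⟩
    · have hflen : 1 ≤ frontier.length := List.length_pos_iff.mpr hfe
      set dist' := frontier.foldl (fun dd p => dd.insert p d) dist with hdist'
      have hitems' : dist'.items = dist.items ++ frontier.map (fun p => (p, d)) :=
        PySem.Dict.items_foldl_insert_fresh (k := fun a => a) (v := fun _ => d)
          (l := frontier) (d := dist) (fun p hp => (hfr p hp).2) (by simpa using hfnd)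
      have hget' : ∀ p, dist'.get? p = if p ∈ frontier then some d else dist.get? p := by
        intro p; rw [hdist', get?_foldl_insert_const]
      have hrelD : ∀ p, D.get? p = dist'.get? p := by intro p; rw [hget', hrel]
      have hdn' : dist'.keys.Nodup :=
        PySem.Dict.nodup_keys_foldl_insert _ _ _ hdn
      have hdb' : ∀ kv ∈ dist'.items, inB R C kv.1 := by
        rw [hitems']
        intro kv hkv
        rcases List.mem_append.mp hkv with h | h
        · exact hdb kv h
        · obtain ⟨p, hp, rfl⟩ := List.mem_map.mp h
          exact (hfr p hp).1
      have hlen' : dist'.items.length = dist.items.length + frontier.length := by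
        rw [hitems', List.length_append, List.length_map]
      have hdle' := items_le R C dist' hdn' hdb'
      set F := (cellsB R C).filter (swCond rooms D) with hF
      set frontier' := expandF rooms R C dist' frontier with hfr'
      have hcontD : ∀ p, dist'.contains p = D.contains p := by
        intro p
        rw [PySem.Dict.contains_eq_isSome_get?, PySem.Dict.contains_eq_isSome_get?, hrelD p]
      have hmemfr' : ∀ p, p ∈ frontier' ↔
          (inB R C p ∧ 0 < getCell rooms p.1 p.2 ∧ dist'.contains p = false ∧
            ∃ q ∈ nbrsB p, q ∈ frontier) := by
        intro p
        rw [hfr', expandF, PySem.Set.mem_ofList, List.mem_flatMap]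
        constructor
        · rintro ⟨f, hf, hpc⟩
          obtain ⟨hnb, hib, hpos, hnc⟩ := (mem_candF rooms R C dist' f p).mp hpc
          exact ⟨hib, hpos, hnc, f, hnb, hf⟩
        · rintro ⟨hib, hpos, hnc, q, hq, hqf⟩
          exact ⟨q, hqf, (mem_candF rooms R C dist' q p).mpr ⟨hq, hib, hpos, hnc⟩⟩
      have hmemF : ∀ p, p ∈ F ↔ p ∈ frontier' := by
        intro p
        rw [hF, List.mem_filter, hmemfr']
        constructor
        · rintro ⟨hpc, hcond⟩
          have hib := (mem_cellsB R C p).mp hpc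
          simp only [swCond, Bool.and_eq_true, Bool.not_eq_true', decide_eq_true_eq] at hcond
          obtain ⟨⟨hpos, hnc⟩, q, hq, hqc⟩ := hcond
          obtain ⟨v, hv⟩ := (contains_true_iff D q).mp hqc
          obtain ⟨hvd, hqf⟩ := hii p hib hpos hnc q hq v hv
          exact ⟨hib, hpos, by rw [hcontD]; exact hnc, q, hq, hqf⟩
        · rintro ⟨hib, hpos, hnc, q, hq, hqf⟩
          have hncD : D.contains p = false := by rw [← hcontD]; exact hnc
          refine ⟨(mem_cellsB R C p).mpr hib, ?_⟩
          have hqc : D.contains q = true :=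
            (contains_true_iff D q).mpr ⟨d, by rw [hrel q, if_pos hqf]⟩
          simp only [swCond, Bool.and_eq_true, Bool.not_eq_true', decide_eq_true_eq]
          exact ⟨⟨hpos, hncD⟩, q, hq, hqc⟩
      have hsw : sweepB rooms R C D
          = (F.foldl (fun dd p => dd.insert p (d + 1)) D, !F.isEmpty) := by
        rw [sweepB, sweep_fold_char rooms R C D d
          (fun p hb hpos hnc q hq v hv => (hii p hb hpos hnc q hq v hv).1)
          (cellsB R C) (fun p hp => (mem_cellsB R C p).mp hp) (D, false), ← hF]
        simp
      set D' := F.foldl (fun dd p => dd.insert p (d + 1)) D with hD'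
      have hgetD' : ∀ p, D'.get? p = if p ∈ F then some (d + 1) else D.get? p := by
        intro p; rw [hD', get?_foldl_insert_const]
      have hFnd : F.Nodup := (nodup_cellsB R C).filter _
      have hFfresh : ∀ p ∈ F, D.contains p = false := by
        intro p hp
        rw [hF, List.mem_filter] at hp
        have h2 := hp.2
        simp only [swCond, Bool.and_eq_true, Bool.not_eq_true', decide_eq_true_eq] at h2
        exact h2.1.2
      have hitemsD' : D'.items = D.items ++ F.map (fun p => (p, d + 1)) :=
        PySem.Dict.items_foldl_insert_fresh (k := fun a => a) (v := fun _ => d + 1)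
          (l := F) (d := D) hFfresh (by simpa using hFnd)
      have hDn' : D'.keys.Nodup := PySem.Dict.nodup_keys_foldl_insert _ _ _ hDn
      have hrel' : ∀ p, D'.get? p = if p ∈ frontier' then some (d + 1) else dist'.get? p := by
        intro p
        rw [hgetD']
        by_cases hm : p ∈ F
        · rw [if_pos hm, if_pos ((hmemF p).mp hm)]
        · rw [if_neg hm, if_neg (fun hc => hm ((hmemF p).mpr hc)), hrelD]
      have hRA : bfsF rooms R C (fuelA + 1) dist frontier d
          = bfsF rooms R C fuelA dist' frontier' (d + 1) := by
        rw [bfsF, if_neg hfe]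
      by_cases hFe : F = []
      · have hfr'e : frontier' = [] := by
          rw [List.eq_nil_iff_forall_not_mem]
          intro p hp
          have hmm := (hmemF p).mpr hp
          rw [hFe] at hmm
          cases hmm
        obtain ⟨fA, rfl⟩ : ∃ fA, fuelA = fA + 1 := ⟨fuelA - 1, by omega⟩
        have hRA2 : bfsF rooms R C (fA + 1) dist' frontier' (d + 1) = dist' := by
          rw [hfr'e, bfsF, if_pos rfl]
        have hD'D : D' = D := by simp [hD', hFe]
        have hRB : bfLoopB rooms R C (fB + 1) D = D := by
          rw [bfLoopB, hsw]
          simp [hFe, hD'D]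
        rw [hRA, hRA2, hRB]
        exact ⟨fun p => (hrelD p).symm, hdn', hdb', hDn, hDb⟩
      · have hFlen : 1 ≤ F.length := List.length_pos_iff.mpr hFe
        have hlenD' : D'.items.length = D.items.length + F.length := by
          rw [hitemsD', List.length_append, List.length_map]
        have hRB : bfLoopB rooms R C (fB + 1) D = bfLoopB rooms R C fB D' := by
          have hnee : F.isEmpty = false := by simp [List.isEmpty_iff, hFe]
          rw [bfLoopB, hsw]
          simp [hnee, hD']
        rw [hRA, hRB]
        refine ih fB dist' frontier' (d + 1) D' hrel'
          (PySem.Set.nodup_ofList _)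
          (fun p hp => ⟨((hmemfr' p).mp hp).1, ((hmemfr' p).mp hp).2.2.1⟩)
          hdb' hdn' hDn' ?_ (by omega) (by omega)
        intro p hib hpos hnc q hq v hv
        rw [hgetD'] at hv
        by_cases hqF : q ∈ F
        · rw [if_pos hqF] at hv
          exact ⟨(Option.some.inj hv).symm, (hmemF q).mp hqF⟩
        · rw [if_neg hqF] at hv
          have hncD : D.contains p = false := by
            have h0 : D'.get? p = none := (contains_false_iff D' p).mp hnc
            rw [hgetD'] at h0
            by_cases hpF : p ∈ F
            · rw [if_pos hpF] at h0; cases h0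
            · rw [if_neg hpF] at h0
              exact (contains_false_iff D p).mpr h0
          obtain ⟨hvd, hqf⟩ := hii p hib hpos hncD q hq v hv
          have hpF : p ∈ F := (hmemF p).mpr ((hmemfr' p).mpr
            ⟨hib, hpos, by rw [hcontD]; exact hncD, q, hq, hqf⟩)
          exfalso
          have h1 : D'.get? p = some (d + 1) := by rw [hgetD', if_pos hpF]
          rw [(contains_false_iff D' p).mp hnc] at h1
          cases h1

-- ===== write-back: equal lookup tables write equal grids =====

lemma shape_applyW (rooms : List (List Int)) :
    ∀ (P : List ((Int × Int) × Int)) (g : List (List Int)),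
    ShapeLike rooms g → ShapeLike rooms (applyW g P)
  | [], _, h => h
  | kv :: P, g, h => shape_applyW rooms P _ (shape_setCell _ _ _ _ _ h)

lemma grid_ext (rooms g1 g2 : List (List Int))
    (h1 : ShapeLike rooms g1) (h2 : ShapeLike rooms g2)
    (h : ∀ p : Int × Int, GoodKey rooms p → getCell g1 p.1 p.2 = getCell g2 p.1 p.2) :
    g1 = g2 := by
  apply List.ext_getElem (by rw [h1.1, h2.1])
  intro i hi1 hi2
  have hir : i < rooms.length := by rw [← h1.1]; exact hi1
  have hrow1 : g1.getD i [] = g1[i] := by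
    rw [List.getD_eq_getElem?_getD, List.getElem?_eq_getElem hi1]; rfl
  have hrow2 : g2.getD i [] = g2[i] := by
    rw [List.getD_eq_getElem?_getD, List.getElem?_eq_getElem hi2]; rfl
  apply List.ext_getElem
  · rw [← hrow1, ← hrow2, h1.2 i, h2.2 i]
  intro j hj1 hj2
  have hjr : j < (rooms.getD i []).length := by
    rw [← h1.2 i, hrow1]; exact hj1
  have hgk : GoodKey rooms ((i : Int), (j : Int)) := by
    refine ⟨Int.natCast_nonneg i, ?_, Int.natCast_nonneg j, ?_⟩
    · simpa using hir
    · simpa using hjr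
  have hval := h ((i : Int), (j : Int)) hgk
  rw [getCell_nonneg_eq _ _ _ (Int.natCast_nonneg i) (Int.natCast_nonneg j),
      getCell_nonneg_eq _ _ _ (Int.natCast_nonneg i) (Int.natCast_nonneg j)] at hval
  simp only [Int.toNat_natCast] at hval
  rw [hrow1, hrow2] at hval
  rw [List.getD_eq_getElem?_getD, List.getElem?_eq_getElem hj1] at hval
  rw [List.getD_eq_getElem?_getD, List.getElem?_eq_getElem hj2] at hval
  exact hval

lemma applyW_eq (rooms : List (List Int)) (R C : Int)
    (hrect : ∀ p, inB R C p → GoodKey rooms p)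
    (P Q : PySem.Dict (Int × Int) Int)
    (hPn : P.keys.Nodup) (hQn : Q.keys.Nodup)
    (hPb : ∀ kv ∈ P.items, inB R C kv.1) (hQb : ∀ kv ∈ Q.items, inB R C kv.1)
    (hpq : ∀ x, P.get? x = Q.get? x) :
    applyW rooms P.items = applyW rooms Q.items := by
  have hPk : ∀ kv ∈ P.items, GoodKey rooms kv.1 := fun kv h => hrect _ (hPb kv h)
  have hQk : ∀ kv ∈ Q.items, GoodKey rooms kv.1 := fun kv h => hrect _ (hQb kv h)
  have hPfst : (P.items.map Prod.fst).Nodup := hPn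
  have hQfst : (Q.items.map Prod.fst).Nodup := hQn
  apply grid_ext rooms _ _
    (shape_applyW rooms P.items rooms (shape_refl rooms))
    (shape_applyW rooms Q.items rooms (shape_refl rooms))
  intro p hg
  cases hx : P.get? p with
  | none =>
    have hx2 : Q.get? p = none := by rw [← hpq]; exact hx
    have hnmP : p ∉ P.items.map Prod.fst := by
      intro hm
      obtain ⟨kv, hkv, rfl⟩ := List.mem_map.mp hm
      rw [PySem.Dict.get?_of_mem_items P hkv hPn] at hx
      cases hx
    have hnmQ : p ∉ Q.items.map Prod.fst := by
      intro hm
      obtain ⟨kv, hkv, rfl⟩ := List.mem_map.mp hm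
      rw [PySem.Dict.get?_of_mem_items Q hkv hQn] at hx2
      cases hx2
    rw [getCell_applyW_not_mem rooms P.items rooms p (shape_refl _) hPk hg.1 hg.2.2.1 hnmP,
        getCell_applyW_not_mem rooms Q.items rooms p (shape_refl _) hQk hg.1 hg.2.2.1 hnmQ]
  | some v =>
    have hmP : (p, v) ∈ P.items := PySem.Dict.mem_items_of_get?_eq_some P hx
    have hmQ : (p, v) ∈ Q.items := PySem.Dict.mem_items_of_get?_eq_some Q (by rw [← hpq]; exact hx)
    rw [getCell_applyW_mem rooms P.items rooms p v (shape_refl _) hPk hPfst hmP,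
        getCell_applyW_mem rooms Q.items rooms p v (shape_refl _) hQk hQfst hmQ]

-- ===== main equivalence =====

theorem main_equiv (rooms : List (List Int)) (hpre : Pre_solution rooms) :
    solution rooms = solution_alt rooms := by
  obtain ⟨hne, hrows⟩ := hpre
  set ROWS : Int := (rooms.length : Int) with hR
  set COLS : Int := (((PySem.List.pyGet? rooms 0).getD []).length : Int) with hC
  set G : List (Int × Int) := (PySem.List.pyRange 0 ROWS 1).flatMap (fun r =>
    (PySem.List.pyRange 0 COLS 1).filterMap (fun c =>
      if getCell rooms r c = 0 then some (r, c) else none)) with hG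
  have hGmem : ∀ p, p ∈ G ↔ (inB ROWS COLS p ∧ getCell rooms p.1 p.2 = 0) := by
    intro p
    rw [hG, List.mem_flatMap]
    constructor
    · rintro ⟨r, hr, hmem⟩
      rw [List.mem_filterMap] at hmem
      obtain ⟨c, hc, heq⟩ := hmem
      rw [PySem.List.mem_pyRange_one] at hr hc
      by_cases h0 : getCell rooms r c = 0
      · rw [if_pos h0] at heq
        cases heq
        exact ⟨⟨hr.1, hr.2, hc.1, hc.2⟩, h0⟩
      · rw [if_neg h0] at heq
        cases heq
    · rintro ⟨⟨h1, h2, h3, h4⟩, hz⟩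
      refine ⟨p.1, PySem.List.mem_pyRange_one.mpr ⟨h1, h2⟩, List.mem_filterMap.mpr
        ⟨p.2, PySem.List.mem_pyRange_one.mpr ⟨h3, h4⟩, ?_⟩⟩
      rw [if_pos hz]
  have hGnodup : G.Nodup := by
    rw [hG]
    rw [List.nodup_flatMap]
    constructor
    · intro r _
      refine List.Nodup.filterMap ?_ (PySem.List.nodup_pyRange_one 0 COLS)
      intro a a' b hb hb'
      have ha : b = (r, a) := by
        by_cases h : getCell rooms r a = 0
        · rw [if_pos h] at hb; simpa using hb.symm
        · rw [if_neg h] at hb; cases hb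
      have ha' : b = (r, a') := by
        by_cases h : getCell rooms r a' = 0
        · rw [if_pos h] at hb'; simpa using hb'.symm
        · rw [if_neg h] at hb'; cases hb'
      rw [ha] at ha'
      exact (Prod.mk.inj ha').2
    · have hnd := PySem.List.nodup_pyRange_one 0 ROWS
      refine hnd.imp ?_
      intro r r' hne' x hx hx'
      rw [List.mem_filterMap] at hx hx'
      obtain ⟨c, _, heq⟩ := hx
      obtain ⟨c', _, heq'⟩ := hx'
      have h1 : x.1 = r := by
        by_cases h : getCell rooms r c = 0
        · rw [if_pos h] at heq; cases heq; rfl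
        · rw [if_neg h] at heq; cases heq
      have h2 : x.1 = r' := by
        by_cases h : getCell rooms r' c' = 0
        · rw [if_pos h] at heq'; cases heq'; rfl
        · rw [if_neg h] at heq'; cases heq'
      exact hne' (h1 ▸ h2)
  have hrect : ∀ p, inB ROWS COLS p → GoodKey rooms p := by
    intro p hp
    obtain ⟨h1, h2, h3, h4⟩ := hp
    have hlen : p.1.toNat < rooms.length := by omega
    have hrow : rooms.getD p.1.toNat [] ∈ rooms := by
      rw [List.getD_eq_getElem?_getD, List.getElem?_eq_getElem hlen]
      exact Option.getD_some ▸ List.getElem_mem hlen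
    have hhead : (PySem.List.pyGet? rooms 0).getD [] = (rooms.head?).getD [] := by
      rw [PySem.List.pyGet?_of_nonneg _ le_rfl]
      congr 1
      exact (List.head?_eq_getElem?).symm
    have := hrows _ hrow
    rw [← hhead] at this
    refine ⟨h1, hlen, h3, ?_⟩
    omega
  have h0R : 0 ≤ ROWS := Int.natCast_nonneg _
  have h0C : 0 ≤ COLS := Int.natCast_nonneg _
  have hlenc : (cellsB ROWS COLS).length = ROWS.toNat * COLS.toNat :=
    length_cellsB ROWS COLS h0R h0C
  -- A-side: the real BFS equals the functional level BFS
  have hsim := bfs_sim rooms ROWS COLS hrect (ROWS.toNat * COLS.toNat + 1)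
    PySem.Dict.empty G PySem.Set.empty 0 le_rfl
    (by intro p
        constructor
        · intro h; cases h
        · rintro ⟨h1 | h1, h2⟩
          · rw [PySem.Dict.contains_empty] at h1; cases h1
          · have hz : getCell rooms p.1 p.2 = 0 := ((hGmem p).mp h1).2
            have : getO rooms p = 0 := hz
            omega)
    (by intro p hp
        obtain ⟨hb, hz⟩ := (hGmem p).mp hp
        exact ⟨hb, by rw [if_pos rfl]; exact hz⟩)
    hGnodup
    (by intro p _; exact PySem.Dict.contains_empty _)
    (by intro kv hkv; cases hkv)
    List.nodup_nil
  -- B-side initial distance table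
  set D0 : PySem.Dict (Int × Int) Int := (cellsB ROWS COLS).foldl (fun d p =>
    if getCell rooms p.1 p.2 = 0 then d.insert p 0 else d) PySem.Dict.empty with hD0
  have hD0get : ∀ x, D0.get? x = if x ∈ G then some (0 : Int) else PySem.Dict.empty.get? x := by
    intro x
    rw [hD0, get?_initFold]
    by_cases hx : x ∈ G
    · rw [if_pos hx]
      obtain ⟨hb, hz⟩ := (hGmem x).mp hx
      rw [if_pos ⟨(mem_cellsB ROWS COLS x).mpr hb, hz⟩]
    · rw [if_neg hx, if_neg (by
        rintro ⟨hm, hz⟩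
        exact hx ((hGmem x).mpr ⟨(mem_cellsB ROWS COLS x).mp hm, hz⟩))]
  have hD0n : D0.keys.Nodup := by
    rw [hD0]
    exact nodup_keys_initFold rooms _ _ PySem.Dict.nodup_keys_empty
  -- the bisimulation
  have hbis := bf_bisim rooms ROWS COLS (ROWS.toNat * COLS.toNat + 1)
    (ROWS.toNat * COLS.toNat + 2) PySem.Dict.empty G 0 D0
    hD0get
    hGnodup
    (fun p hp => ⟨((hGmem p).mp hp).1, PySem.Dict.contains_empty _⟩)
    (by intro kv hkv; cases hkv)
    PySem.Dict.nodup_keys_empty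
    hD0n
    (by intro p hib hpos hnc q hq v hv
        rw [hD0get q] at hv
        by_cases hqG : q ∈ G
        · rw [if_pos hqG] at hv
          exact ⟨(Option.some.inj hv).symm, hqG⟩
        · rw [if_neg hqG, PySem.Dict.get?_empty] at hv
          cases hv)
    (by simp [hlenc])
    (by simp [hlenc])
  obtain ⟨hpt, hAn, hAb, hBn, hBb⟩ := hbis
  have happ := applyW_eq rooms ROWS COLS hrect
    (bfsF rooms ROWS COLS (ROWS.toNat * COLS.toNat + 1) PySem.Dict.empty G 0)
    (bfLoopB rooms ROWS COLS (ROWS.toNat * COLS.toNat + 2) D0)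
    hAn hBn hAb hBb hpt
  show bfsA ROWS COLS (ROWS.toNat * COLS.toNat + 1) rooms G PySem.Set.empty 0
    = (bfLoopB rooms ROWS COLS (ROWS.toNat * COLS.toNat + 2) D0).items.foldl
        (fun g kv => setCell g kv.1.1 kv.1.2 kv.2) rooms
  calc bfsA ROWS COLS (ROWS.toNat * COLS.toNat + 1) rooms G PySem.Set.empty 0
      = applyW rooms (bfsF rooms ROWS COLS (ROWS.toNat * COLS.toNat + 1)
          PySem.Dict.empty G 0).items := hsim
    _ = applyW rooms (bfLoopB rooms ROWS COLS (ROWS.toNat * COLS.toNat + 2) D0).items := happ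
    _ = _ := rfl

-- ===== VERDICT (by name: the statement is the Claim_ definition above) =====
theorem solution_spec : Claim_equal_solution := by
  intro rooms _ hpre
  exact main_equiv rooms hpre
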